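-- pv_equiv track=rewrite | github.com/Dahlkar/advent-of-code | 2015/1/main.py | parse
-- ===== SOURCE A (Python) =====
-- def parse(instructions):
--     floor = 0
--     position = 0
--     for i, c in enumerate(instructions, start=1):
--         if c == '(':
--             floor += 1
--         if c == ')':
--             floor -= 1
--
--         if position == 0 and floor == -1:
--             position = i
--
--     return floor, position
-- ===== SOURCE B (Python) =====
-- def parse(instructions):
--     floor = instructions.count('(') - instructions.count(')')
--     position = 0
--     total = 0
--     for i, c in enumerate(instructions, start=1):
--         if c == '(':
--             total += 1
--         elif c == ')':
--             total -= 1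
--         if total == -1:
--             position = i
--             break
--     return floor, position
-- ===== Notes on version B (the rewrite author's own statement) =====
-- stated objective: simpler
-- what changed: Replaces A's single fused accumulating pass with a closed-form floor from the two built-in paren counts plus a separate early-exit scan that returns at the first basement position.
import Mathlib
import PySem

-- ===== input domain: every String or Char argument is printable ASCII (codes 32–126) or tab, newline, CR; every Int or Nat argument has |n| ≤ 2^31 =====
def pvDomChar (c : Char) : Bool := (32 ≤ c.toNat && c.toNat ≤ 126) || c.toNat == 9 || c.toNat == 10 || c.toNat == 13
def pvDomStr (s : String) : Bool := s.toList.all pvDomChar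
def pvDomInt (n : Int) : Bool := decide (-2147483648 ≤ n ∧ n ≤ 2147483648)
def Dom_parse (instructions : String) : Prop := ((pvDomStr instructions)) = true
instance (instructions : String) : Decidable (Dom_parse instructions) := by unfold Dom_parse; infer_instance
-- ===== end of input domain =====

-- B replaces A's single fused pass by a closed-form count difference for the floor
-- plus a separate early-exit scan for the first basement position (objective: simpler).

-- ===== PORT A =====
-- for i, c in enumerate(instructions, start=1): two independent ifs on floor, then the position guard
def parseLoop : List Char → Int → Int → Int → Int × Int
  | [], floor, position, _ => (floor, position)
  | c :: cs, floor, position, i =>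
    let floor1 := if c = '(' then floor + 1 else floor
    let floor2 := if c = ')' then floor1 - 1 else floor1
    let position' := if position = 0 ∧ floor2 = -1 then i else position
    parseLoop cs floor2 position' (i + 1)

def parse (instructions : String) : Int × Int :=
  parseLoop instructions.toList 0 0 1

-- ===== PORT B =====
-- the separate scan: running total from 0, return i at the first total = -1, else 0
def parseAltFind : List Char → Int → Int → Int
  | [], _, _ => 0
  | c :: cs, total, i =>
    let total' := if c = '(' then total + 1 else if c = ')' then total - 1 else total
    if total' = -1 then i else parseAltFind cs total' (i + 1)

def parse_alt (instructions : String) : Int × Int :=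
  ((PySem.Str.count instructions "(" : Int) - (PySem.Str.count instructions ")" : Int),
   parseAltFind instructions.toList 0 1)

-- ===== PRECONDITION & SPEC =====
def Spec_parse (instructions : String) (out : Int × Int) : Prop := out = parse_alt instructions
instance (instructions : String) (out : Int × Int) : Decidable (Spec_parse instructions out) := by unfold Spec_parse; infer_instance

-- ===== CLAIM (what is proved, stated in full; the proofs are below) =====
def Claim_equal_parse : Prop := ∀ (instructions : String), Dom_parse instructions → Spec_parse instructions (parse instructions)

-- ===== LEMMAS AND PROOFS =====

theorem count_go_singleton (c : Char) : ∀ (fuel : Nat) (l : List Char) (acc : Nat), l.length ≤ fuel →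
    PySem.Chars.count.go [c] fuel l acc = acc + l.count c := by
  intro fuel
  induction fuel with
  | zero =>
    intro l acc h
    have : l = [] := List.eq_nil_of_length_eq_zero (Nat.le_zero.mp h)
    subst this; simp [PySem.Chars.count.go]
  | succ n ih =>
    intro l acc h
    cases l with
    | nil => simp [PySem.Chars.count.go]
    | cons x t =>
      rw [show PySem.Chars.count.go [c] (n+1) (x :: t) acc =
            if List.isPrefixOf [c] (x :: t) = true then PySem.Chars.count.go [c] n (List.drop 1 (x :: t)) (acc + 1)
            else PySem.Chars.count.go [c] n t acc from rfl]
      simp only [List.isPrefixOf, List.drop_one, List.tail_cons]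
      by_cases hx : x = c
      · subst hx
        simp [ih t _ (by simpa using h)]
        omega
      · simp [hx, Ne.symm hx, ih t _ (by simpa using h), beq_iff_eq]

theorem count_singleton (l : List Char) (c : Char) :
    PySem.Chars.count l [c] = l.count c := by
  simp [PySem.Chars.count, count_go_singleton c l.length l 0 le_rfl]

theorem parseLoop_fst (cs : List Char) : ∀ (f p i : Int),
    (parseLoop cs f p i).1 = f + ((cs.count '(' : Int) - (cs.count ')' : Int)) := by
  induction cs with
  | nil => intro f p i; simp [parseLoop]
  | cons c cs ih =>
    intro f p i
    simp only [parseLoop, ih, List.count_cons, beq_iff_eq]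
    by_cases h1 : c = '('
    · simp [h1]; ring
    · by_cases h2 : c = ')'
      · simp [h2]; ring
      · simp [h1, h2]

theorem parseLoop_snd_of_ne (cs : List Char) : ∀ (f p i : Int), p ≠ 0 →
    (parseLoop cs f p i).2 = p := by
  induction cs with
  | nil => intro f p i _; simp [parseLoop]
  | cons c cs ih =>
    intro f p i hp
    simp only [parseLoop, hp, false_and, if_false]
    exact ih _ _ _ hp

theorem parseLoop_snd_zero (cs : List Char) : ∀ (f i : Int), 1 ≤ i →
    (parseLoop cs f 0 i).2 = parseAltFind cs f i := by
  induction cs with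
  | nil => intro f i _; simp [parseLoop, parseAltFind]
  | cons c cs ih =>
    intro f i hi
    by_cases h1 : c = '('
    · subst h1
      have hne : ¬ (('(' : Char) = ')') := by decide
      simp only [parseLoop, parseAltFind, hne, if_true, if_false, true_and]
      by_cases hm : f + 1 = -1
      · simp only [hm]
        rw [if_pos trivial, if_pos trivial]
        exact parseLoop_snd_of_ne cs _ i _ (by omega)
      · rw [if_neg hm, if_neg hm]
        exact ih _ (i + 1) (by omega)
    · by_cases h2 : c = ')'
      · subst h2
        simp only [parseLoop, parseAltFind, h1, if_false, if_true, true_and]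
        by_cases hm : f - 1 = -1
        · simp only [hm]
          rw [if_pos trivial, if_pos trivial]
          exact parseLoop_snd_of_ne cs _ i _ (by omega)
        · rw [if_neg hm, if_neg hm]
          exact ih _ (i + 1) (by omega)
      · simp only [parseLoop, parseAltFind, h1, h2, if_false, true_and]
        by_cases hm : f = -1
        · simp only [hm]
          rw [if_pos trivial, if_pos trivial]
          exact parseLoop_snd_of_ne cs _ i _ (by omega)
        · rw [if_neg hm, if_neg hm]
          exact ih _ (i + 1) (by omega)

-- ===== VERDICT (by name: the statement is the Claim_ definition above) =====
theorem parse_spec : Claim_equal_parse := by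
  intro s _
  unfold Spec_parse parse parse_alt
  apply Prod.ext
  · simp [parseLoop_fst, PySem.Str.count_eq, count_singleton]
  · exact parseLoop_snd_zero s.toList 0 1 (by omega)
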